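-- pv_equiv track=rewrite | github.com/magahet/kbai | projects/02-2x2-rpms/submission/FigureMatcher.py | remapReferences
-- ===== SOURCE A (Python) =====
-- def remapReferences(obj, objMap):
--     newObj = {}
--     for attrib in obj:
--         if attrib in ['inside', 'above', 'left-of']:
--             oldValues = obj[attrib].split(',')
--             newObj[attrib] = ','.join(sorted([objMap[v] for v in oldValues if v in objMap and objMap[v] is not None]))
--         else:
--             newObj[attrib] = obj[attrib]
--     return newObj
-- ===== SOURCE B (Python) =====
-- def remapReferences(obj, objMap):
--     def remap(val):
--         counts = {}
--         for v in val.split(','):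
--             counts[v] = counts.get(v, 0) + 1
--         mapped = []
--         for old, new in objMap.items():
--             if new is not None and old in counts:
--                 mapped.extend([new] * counts[old])
--         mapped.sort()
--         return ','.join(mapped)
--     return {k: (remap(v) if k in ('inside', 'above', 'left-of') else v)
--             for k, v in obj.items()}
-- ===== Notes on version B (the rewrite author's own statement) =====
-- stated objective: alternative
-- what changed: B inverts the inner remap: it counts the comma-separated tokens once into a dict and then scans objMap's items, emitting each mapped name count-many times and sorting, instead of A's per-token objMap lookup; the output dict is built by a comprehension over obj's items.
import Mathlib
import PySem

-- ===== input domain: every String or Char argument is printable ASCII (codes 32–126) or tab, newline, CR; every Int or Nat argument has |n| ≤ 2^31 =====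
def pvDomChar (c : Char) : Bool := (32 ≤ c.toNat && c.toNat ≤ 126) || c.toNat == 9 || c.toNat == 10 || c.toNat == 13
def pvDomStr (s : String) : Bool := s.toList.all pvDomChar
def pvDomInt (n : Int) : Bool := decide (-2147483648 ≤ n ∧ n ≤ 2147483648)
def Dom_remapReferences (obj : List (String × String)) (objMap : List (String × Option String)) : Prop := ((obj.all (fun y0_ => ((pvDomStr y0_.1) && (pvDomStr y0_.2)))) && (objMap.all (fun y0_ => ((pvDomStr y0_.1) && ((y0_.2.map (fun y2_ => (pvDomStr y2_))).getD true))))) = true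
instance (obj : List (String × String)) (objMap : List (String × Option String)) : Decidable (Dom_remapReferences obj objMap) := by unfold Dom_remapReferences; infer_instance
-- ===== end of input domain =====

-- B inverts the inner remap: it counts the comma-separated tokens once and then scans objMap's
-- items, emitting each mapped name count-many times, instead of A's per-token dict lookup;
-- return values are proved equal on dict inputs (distinct keys).

-- ===== PORT A =====
def remapReferences (obj : List (String × String)) (objMap : List (String × Option String)) : List (String × String) :=
  (obj.foldl
    (fun newObj p =>
      if p.1 ∈ (["inside", "above", "left-of"] : List String) then
        let oldValues := (PySem.Str.split? ((PySem.Dict.get? (PySem.Dict.mk obj) p.1).getD "") ",").getD []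
        PySem.Dict.insert newObj p.1
          (PySem.Str.join ","
            (PySem.List.sorted
              (oldValues.filterMap (fun v => (PySem.Dict.get? (PySem.Dict.mk objMap) v).getD none))
              (fun x => x) false))
      else
        PySem.Dict.insert newObj p.1 ((PySem.Dict.get? (PySem.Dict.mk obj) p.1).getD ""))
    (PySem.Dict.mk ([] : List (String × String)))).items

-- ===== PORT B =====
-- the nested helper 'remap' of Source B
def remapReferences_altRemap (objMap : List (String × Option String)) (val : String) : String :=
  let counts :=
    ((PySem.Str.split? val ",").getD []).foldl
      (fun d v => PySem.Dict.insert d v (PySem.Dict.getD d v (0 : Int) + 1)) PySem.Dict.empty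
  let mapped :=
    (PySem.Dict.mk objMap).items.foldl
      (fun mapped p =>
        match p.2 with
        | some new =>
            if PySem.Dict.contains counts p.1 then
              mapped ++ PySem.List.pyRepeat [new] (PySem.Dict.getD counts p.1 0)
            else mapped
        | none => mapped)
      ([] : List String)
  PySem.Str.join "," (PySem.List.sorted mapped (fun x => x) false)

def remapReferences_alt (obj : List (String × String)) (objMap : List (String × Option String)) : List (String × String) :=
  ((PySem.Dict.mk obj).items.foldl
    (fun d p =>
      PySem.Dict.insert d p.1
        (if p.1 ∈ (["inside", "above", "left-of"] : List String) then
           remapReferences_altRemap objMap p.2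
         else p.2))
    PySem.Dict.empty).items

-- ===== PRECONDITION & SPEC =====
-- Pre_ excludes association lists whose keys repeat: obj and objMap are Python dicts, whose
-- keys are necessarily distinct, so no Python input is excluded.
def Pre_remapReferences (obj : List (String × String)) (objMap : List (String × Option String)) : Prop :=
  (obj.map Prod.fst).Nodup ∧ (objMap.map Prod.fst).Nodup
instance (obj : List (String × String)) (objMap : List (String × Option String)) : Decidable (Pre_remapReferences obj objMap) := by unfold Pre_remapReferences; infer_instance

def pvWitness_remapReferences : (List (String × String)) × (List (String × Option String)) :=
  ([("inside", "a,b,a"), ("shape", "square")], [("a", some "x"), ("b", none)])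

def Spec_remapReferences (obj : List (String × String)) (objMap : List (String × Option String)) (out : List (String × String)) : Prop := out = remapReferences_alt obj objMap
instance (obj : List (String × String)) (objMap : List (String × Option String)) (out : List (String × String)) : Decidable (Spec_remapReferences obj objMap out) := by unfold Spec_remapReferences; infer_instance

-- ===== CLAIM (what is proved, stated in full; the proofs are below) =====
def Claim_equal_remapReferences : Prop := ∀ (obj : List (String × String)) (objMap : List (String × Option String)), Dom_remapReferences obj objMap → Pre_remapReferences obj objMap → Spec_remapReferences obj objMap (remapReferences obj objMap)

-- ===== LEMMAS AND PROOFS =====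

-- the value A computes for a reference attribute (used only by the proofs)
def pvT (objMap : List (String × Option String)) (s : String) : String :=
  PySem.Str.join ","
    (PySem.List.sorted
      (((PySem.Str.split? s ",").getD []).filterMap
        (fun v => (PySem.Dict.get? (PySem.Dict.mk objMap) v).getD none))
      (fun x => x) false)

def pvF (objMap : List (String × Option String)) (p : String × String) : String × String :=
  if p.1 ∈ (["inside", "above", "left-of"] : List String) then (p.1, pvT objMap p.2) else p

-- what one objMap entry contributes in B
def pvG (tokens : List String) (p : String × Option String) : List String :=
  match p.2 with
  | some s =>
      if PySem.Dict.contains (PySem.Dict.counter tokens) p.1 then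
        List.replicate (tokens.count p.1) s
      else []
  | none => []

theorem pv_get?_mem {obj : List (String × String)} (hnd : (obj.map Prod.fst).Nodup)
    {p : String × String} (hp : p ∈ obj) :
    PySem.Dict.get? (PySem.Dict.mk obj) p.1 = some p.2 := by
  have : (p.1, p.2) ∈ (PySem.Dict.mk obj).items := by simpa using hp
  exact PySem.Dict.get?_of_mem_items _ this (by simpa [PySem.Dict.keys] using hnd)

theorem pv_A_fold (obj : List (String × String)) (objMap : List (String × Option String))
    (hnd : (obj.map Prod.fst).Nodup) :
    ∀ (l acc : List (String × String)), (∀ p ∈ l, p ∈ obj) →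
      ((acc ++ l).map Prod.fst).Nodup →
      (l.foldl
        (fun newObj p =>
          if p.1 ∈ (["inside", "above", "left-of"] : List String) then
            let oldValues := (PySem.Str.split? ((PySem.Dict.get? (PySem.Dict.mk obj) p.1).getD "") ",").getD []
            PySem.Dict.insert newObj p.1
              (PySem.Str.join ","
                (PySem.List.sorted
                  (oldValues.filterMap (fun v => (PySem.Dict.get? (PySem.Dict.mk objMap) v).getD none))
                  (fun x => x) false))
          else
            PySem.Dict.insert newObj p.1 ((PySem.Dict.get? (PySem.Dict.mk obj) p.1).getD ""))
        (PySem.Dict.mk acc)).items = acc ++ l.map (pvF objMap) := by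
  intro l
  induction l with
  | nil => intro acc _ _; simp
  | cons p l ih =>
    intro acc hsub hnd2
    have hpobj : p ∈ obj := hsub p (List.mem_cons_self ..)
    have hget := pv_get?_mem hnd hpobj
    have hfresh : ¬ (PySem.Dict.mk acc).contains p.1 = true := by
      rw [PySem.Dict.contains_iff_mem_keys _ _]
      simp only [PySem.Dict.keys]
      intro hmem
      have : ¬ (p.1 ∈ acc.map Prod.fst) := by
        have := hnd2
        simp only [List.map_append, List.nodup_append, List.map_cons] at this
        intro h
        exact this.2.2 p.1 h p.1 (by simp) rfl
      exact this hmem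
    have hfresh' : (PySem.Dict.mk acc).contains p.1 = false := by
      cases h : (PySem.Dict.mk acc).contains p.1 with
      | false => rfl
      | true => exact absurd h hfresh
    have hstep : ∀ (v : String),
        (PySem.Dict.insert (PySem.Dict.mk acc) p.1 v).items = acc ++ [(p.1, v)] := by
      intro v
      rw [PySem.Dict.items_insert, hfresh']
      simp
    simp only [List.foldl_cons]
    by_cases hm : p.1 ∈ (["inside", "above", "left-of"] : List String)
    · rw [if_pos hm]
      have : PySem.Dict.insert (PySem.Dict.mk acc) p.1
          (PySem.Str.join ","
            (PySem.List.sorted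
              ((((PySem.Str.split? ((PySem.Dict.get? (PySem.Dict.mk obj) p.1).getD "") ",").getD [])).filterMap
                (fun v => (PySem.Dict.get? (PySem.Dict.mk objMap) v).getD none))
              (fun x => x) false)) = PySem.Dict.mk (acc ++ [pvF objMap p]) := by
        apply PySem.Dict.ext
        rw [hstep]
        simp [pvF, pvT, hm, hget]
      rw [this, ih (acc ++ [pvF objMap p]) (fun q hq => hsub q (List.mem_cons_of_mem _ hq))
        (by
          have h1 : (pvF objMap p).1 = p.1 := by by_cases h : p.1 ∈ (["inside","above","left-of"] : List String) <;> simp [pvF, h]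
          simpa [List.map_append, h1, List.append_assoc] using hnd2)]
      simp
    · rw [if_neg hm]
      have : PySem.Dict.insert (PySem.Dict.mk acc) p.1
          ((PySem.Dict.get? (PySem.Dict.mk obj) p.1).getD "") = PySem.Dict.mk (acc ++ [pvF objMap p]) := by
        apply PySem.Dict.ext
        rw [hstep]
        simp [pvF, hm, hget]
      rw [this, ih (acc ++ [pvF objMap p]) (fun q hq => hsub q (List.mem_cons_of_mem _ hq))
        (by
          have h1 : (pvF objMap p).1 = p.1 := by simp [pvF, hm]
          simpa [List.map_append, h1, List.append_assoc] using hnd2)]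
      simp

-- B's inner accumulation loop is a flatMap of per-entry contributions
theorem pv_B_inner_fold (tokens : List String) :
    ∀ (l : List (String × Option String)) (acc : List String),
      (l.foldl
        (fun mapped p =>
          match p.2 with
          | some new =>
              if PySem.Dict.contains (PySem.Dict.counter tokens) p.1 then
                mapped ++ PySem.List.pyRepeat [new] (PySem.Dict.getD (PySem.Dict.counter tokens) p.1 0)
              else mapped
          | none => mapped)
        acc) = acc ++ l.flatMap (pvG tokens) := by
  intro l
  induction l with
  | nil => intro acc; simp
  | cons p l ih =>
    intro acc
    simp only [List.foldl_cons, List.flatMap_cons]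
    cases h : p.2 with
    | none => rw [ih]; simp [pvG, h]
    | some new =>
      simp only [h]
      by_cases hc : PySem.Dict.contains (PySem.Dict.counter tokens) p.1 = true
      · rw [if_pos hc, ih, PySem.List.pyRepeat_singleton, PySem.Dict.getD_counter]
        simp [pvG, h, hc]
      · rw [if_neg hc, ih]
        simp [pvG, h, hc]

-- filterMap over a constant list
theorem pv_filterMap_replicate_some {a b : String} {f : String → Option String}
    (h : f a = some b) (n : Nat) : (List.replicate n a).filterMap f = List.replicate n b := by
  induction n with
  | zero => simp
  | succ n ih => simp [List.replicate_succ, h, ih]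

theorem pv_filterMap_replicate_none {a : String} {f : String → Option String}
    (h : f a = none) (n : Nat) : (List.replicate n a).filterMap f = [] := by
  induction n with
  | zero => simp
  | succ n ih => simp [List.replicate_succ, h, ih]

-- the multiset of mapped names is the same for A's per-token lookup and B's objMap scan
theorem pv_perm : ∀ (M : List (String × Option String)), (M.map Prod.fst).Nodup →
    ∀ (tokens : List String),
    (M.flatMap (pvG tokens)).Perm
      (tokens.filterMap (fun v => (PySem.Dict.get? (PySem.Dict.mk M) v).getD none)) := by
  intro M
  induction M with
  | nil =>
    intro _ tokens
    simp [PySem.Dict.get?]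
  | cons q M ih =>
    intro hnd tokens
    obtain ⟨k, opt⟩ := q
    simp only [List.map_cons, List.nodup_cons] at hnd
    obtain ⟨hk, hndM⟩ := hnd
    have hfv : ∀ v, ((PySem.Dict.get? (PySem.Dict.mk ((k, opt) :: M)) v).getD none) =
        if v == k then opt else ((PySem.Dict.get? (PySem.Dict.mk M) v).getD none) := by
      intro v
      rw [PySem.Dict.get?_mk_cons]
      by_cases h : v = k
      · simp [h]
      · simp [h, Ne.symm h]
    have hfk : ((PySem.Dict.get? (PySem.Dict.mk ((k, opt) :: M)) k).getD none) = opt := by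
      rw [hfv]; simp
    have hA1 : (tokens.filter (fun v => v == k)).filterMap
        (fun v => (PySem.Dict.get? (PySem.Dict.mk ((k, opt) :: M)) v).getD none) =
        pvG tokens (k, opt) := by
      rw [List.filter_beq k]
      cases hoptc : opt with
      | some s =>
        subst hoptc
        rw [pv_filterMap_replicate_some hfk]
        by_cases hm : k ∈ tokens
        · simp [pvG, PySem.Dict.contains_counter, hm]
        · simp [pvG, List.count_eq_zero.mpr hm]
      | none =>
        subst hoptc
        rw [pv_filterMap_replicate_none hfk]
        simp [pvG]
    have hA2 : (tokens.filter (fun v => !(v == k))).filterMap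
        (fun v => (PySem.Dict.get? (PySem.Dict.mk ((k, opt) :: M)) v).getD none) =
        (tokens.filter (fun v => !(v == k))).filterMap
        (fun v => (PySem.Dict.get? (PySem.Dict.mk M) v).getD none) := by
      apply List.filterMap_congr
      intro v hv
      have hne : (v == k) = false := by
        have := (List.mem_filter.mp hv).2
        simpa using this
      rw [hfv, hne]
      simp
    have hGcongr : M.flatMap (pvG (tokens.filter (fun v => !(v == k)))) =
        M.flatMap (pvG tokens) := by
      apply List.flatMap_congr
      intro p hp
      have hpk : p.1 ≠ k := by
        intro h
        exact hk (List.mem_map.mpr ⟨p, hp, h⟩)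
      have hpkb : (p.1 == k) = false := by simpa using hpk
      have hcount : (tokens.filter (fun v => !(v == k))).count p.1 = tokens.count p.1 :=
        List.count_filter (by simp [hpkb])
      have hmem : (p.1 ∈ tokens.filter (fun v => !(v == k))) ↔ p.1 ∈ tokens := by
        simp [List.mem_filter, hpkb]
      cases hp2 : p.2 with
      | none => simp [pvG, hp2]
      | some s =>
        by_cases hm : p.1 ∈ tokens
        · simp [pvG, hp2, PySem.Dict.contains_counter, hcount, hm, hmem.mpr hm]
        · simp [pvG, hp2, List.count_eq_zero.mpr hm,
            List.count_eq_zero.mpr (fun h => hm (hmem.mp h))]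
    have hIH : (M.flatMap (pvG (tokens.filter (fun v => !(v == k))))).Perm
        ((tokens.filter (fun v => !(v == k))).filterMap
          (fun v => (PySem.Dict.get? (PySem.Dict.mk ((k, opt) :: M)) v).getD none)) := by
      rw [hA2]; exact ih hndM _
    have main : (pvG tokens (k, opt) ++ M.flatMap (pvG tokens)).Perm
        (tokens.filterMap (fun v => (PySem.Dict.get? (PySem.Dict.mk ((k, opt) :: M)) v).getD none)) := by
      rw [← hGcongr, ← hA1]
      exact (List.Perm.append_left _ hIH).trans
        (by rw [← List.filterMap_append]
            exact (List.filter_append_perm _ tokens).filterMap _)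
    simpa using main

-- pointwise: B's remap equals A's value transformation
theorem pv_remap_eq (objMap : List (String × Option String)) (hnd : (objMap.map Prod.fst).Nodup)
    (s : String) : remapReferences_altRemap objMap s = pvT objMap s := by
  simp only [remapReferences_altRemap, pvT]
  rw [PySem.Dict.foldl_insert_getD_add_one_eq_counter]
  rw [pv_B_inner_fold _ objMap []]
  simp only [List.nil_append]
  exact congrArg (PySem.Str.join ",")
    ((PySem.List.sorted_id_eq_sorted_id_iff_perm _ _).mpr
      (pv_perm objMap hnd ((PySem.Str.split? s ",").getD [])))

-- ===== VERDICT (by name: the statement is the Claim_ definition above) =====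
theorem remapReferences_spec : Claim_equal_remapReferences := by
  intro obj objMap _ hpre
  obtain ⟨hobj, hmap⟩ := hpre
  unfold Spec_remapReferences remapReferences remapReferences_alt
  rw [pv_A_fold obj objMap hobj obj [] (fun _ h => h) (by simpa using hobj)]
  have hitems : (PySem.Dict.mk obj).items = obj := rfl
  rw [hitems, PySem.Dict.items_foldl_insert_fresh]
  · have hemp : (PySem.Dict.empty : PySem.Dict String String).items = [] := rfl
    simp only [List.nil_append, hemp]
    apply List.map_congr_left
    intro p _
    by_cases h : p.1 ∈ (["inside", "above", "left-of"] : List String)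
    · simp [pvF, h, pv_remap_eq objMap hmap]
    · simp [pvF, h]
  · intro a _; simp
  · exact hobj
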